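-- pv_equiv track=rewrite | github.com/RZMNR/advent_of_code2025 | day02/gift_shop.py | find_invalid_id
-- ===== SOURCE A (Python) =====
-- def find_invalid_id(start: int, end: int):
--     invalid_ids: list[int] = []
--     for i in range(start, end + 1):
--         str_i = str(i)
--         length_i = len(str_i)
--         half_i = divmod(length_i, 2)[0]
--         first = str_i[0:half_i]
--         last = str_i[half_i:]
--
--         if first == last:
--             invalid_ids.append(i)
--
--     return invalid_ids
-- ===== SOURCE B (Python) =====
-- def find_invalid_id(start: int, end: int):
--     # Enumerate candidates h*(10^k+1) (the numbers whose decimal string is some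
--     # k-digit block written twice) per even length 2k, clipped to [start, end].
--     out = []
--     k = 1
--     while 10 ** (k - 1) * (10 ** k + 1) <= end:
--         p = 10 ** k + 1
--         h_lo = max(10 ** (k - 1), -((-start) // p))
--         h_hi = min(10 ** k - 1, end // p)
--         for h in range(h_lo, h_hi + 1):
--             out.append(h * p)
--         k += 1
--     return out
-- ===== Notes on version B (the rewrite author's own statement) =====
-- stated objective: faster
-- what changed: Instead of scanning every integer in [start, end] and comparing string halves, B enumerates the answers directly: for each half-length k it emits h*(10^k+1) for the k-digit h whose multiples fall in range, in ascending order.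
import Mathlib
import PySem

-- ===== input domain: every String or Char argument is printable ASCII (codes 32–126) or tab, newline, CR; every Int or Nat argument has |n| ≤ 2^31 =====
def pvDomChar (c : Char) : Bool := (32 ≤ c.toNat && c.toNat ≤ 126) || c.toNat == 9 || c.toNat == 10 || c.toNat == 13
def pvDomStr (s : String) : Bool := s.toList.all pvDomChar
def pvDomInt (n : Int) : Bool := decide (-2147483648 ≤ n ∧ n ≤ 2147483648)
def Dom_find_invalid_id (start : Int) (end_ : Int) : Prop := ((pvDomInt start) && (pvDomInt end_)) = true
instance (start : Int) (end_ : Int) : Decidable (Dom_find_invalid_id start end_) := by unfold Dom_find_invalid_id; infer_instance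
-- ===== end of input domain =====

-- ===== PORT A =====
-- A: scan range(start, end+1), keep i whose decimal string's two halves are equal.
def find_invalid_id (start : Int) (end_ : Int) : List Int :=
  (PySem.List.pyRange start (end_ + 1) 1).foldl (fun invalid_ids i =>
    let str_i := PySem.Int.toStr i
    let length_i := PySem.Str.len str_i
    let half_i := PySem.Int.floordiv length_i 2  -- divmod(length_i, 2)[0] is floor division
    let first := PySem.Str.slice str_i (some 0) (some half_i)
    let last := PySem.Str.slice str_i (some half_i) none
    if first == last then invalid_ids ++ [i] else invalid_ids) []

-- ===== PORT B =====
-- B (faster): per half-length k, emit h*(10^k+1) for the k-digit h in range; ascending.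
def altGo (start : Int) (end_ : Int) (k : Nat) : List Int :=
  if end_ < 10 ^ (k - 1) * (10 ^ k + 1) then []
  else
    let p : Int := 10 ^ k + 1
    let h_lo : Int := max (10 ^ (k - 1)) (-(PySem.Int.floordiv (-start) p))
    let h_hi : Int := min (10 ^ k - 1) (PySem.Int.floordiv end_ p)
    ((PySem.List.pyRange h_lo (h_hi + 1) 1).map (fun h => h * p)) ++ altGo start end_ (k + 1)
termination_by end_.toNat + 1 - k
decreasing_by
  rename_i h
  have h10 : (k : Int) < 10 ^ k := by exact_mod_cast Nat.lt_pow_self (by norm_num) (n := k)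
  have h1 : (1 : Int) ≤ 10 ^ (k - 1) := one_le_pow₀ (by norm_num)
  have h2 : (10 : Int) ^ k + 1 ≤ 10 ^ (k - 1) * (10 ^ k + 1) := le_mul_of_one_le_left (by positivity) h1
  omega

def find_invalid_id_alt (start : Int) (end_ : Int) : List Int := altGo start end_ 1

-- ===== PRECONDITION & SPEC =====
def Spec_find_invalid_id (start : Int) (end_ : Int) (out : List Int) : Prop := out = find_invalid_id_alt start end_
instance (start : Int) (end_ : Int) (out : List Int) : Decidable (Spec_find_invalid_id start end_ out) := by unfold Spec_find_invalid_id; infer_instance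

-- ===== CLAIM (what is proved, stated in full; the proofs are below) =====
def Claim_equal_find_invalid_id : Prop := ∀ (start : Int) (end_ : Int), Dom_find_invalid_id start end_ → Spec_find_invalid_id start end_ (find_invalid_id start end_)

-- ===== LEMMAS AND PROOFS =====

-- 1. concatenation
theorem digits_concat (b : Nat) : ∀ a : Nat, 0 < a →
    Nat.toDigits 10 (a * 10 ^ (Nat.toDigits 10 b).length + b) = Nat.toDigits 10 a ++ Nat.toDigits 10 b := by
  induction b using Nat.strong_induction_on with
  | _ b ih =>
    intro a ha
    by_cases hb : b < 10
    · have hlen1 : (Nat.toDigits 10 b).length = 1 := by rw [Nat.toDigits_of_lt_base hb]; rfl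
      rw [hlen1, pow_one, Nat.mul_comm, ← Nat.toDigits_append_toDigits (by norm_num) ha hb]
    · rw [Nat.not_lt] at hb
      have hrec := Nat.toDigits_of_base_le (b := 10) (n := b) (by norm_num) hb
      have hlen : (Nat.toDigits 10 b).length = (Nat.toDigits 10 (b / 10)).length + 1 := by
        rw [hrec]; simp
      have hd : b % 10 < 10 := Nat.mod_lt _ (by norm_num)
      have hq : 0 < a * 10 ^ (Nat.toDigits 10 (b/10)).length + b / 10 := by positivity
      have key := Nat.toDigits_append_toDigits (b := 10)
        (n := a * 10 ^ (Nat.toDigits 10 (b/10)).length + b / 10) (d := b % 10) (by norm_num) hq hd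
      have harith : 10 * (a * 10 ^ (Nat.toDigits 10 (b/10)).length + b / 10) + b % 10
          = a * 10 ^ (Nat.toDigits 10 b).length + b := by
        rw [hlen, pow_succ]
        have := Nat.div_add_mod b 10
        ring_nf
        omega
      rw [harith] at key
      rw [← key, ih (b/10) (by omega) a ha, hrec, Nat.toDigits_of_lt_base hd]
      simp

-- 2. length from bounds
theorem len_digits_of_bounds {n k : Nat} (hk : 1 ≤ k) (h1 : 10 ^ (k-1) ≤ n) (h2 : n < 10 ^ k) :
    (Nat.toDigits 10 n).length = k := by
  have hle : (Nat.toDigits 10 n).length ≤ k :=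
    (Nat.length_toDigits_le_iff (by norm_num) (by omega)).2 h2
  rcases Nat.lt_or_ge (Nat.toDigits 10 n).length k with hlt | hge
  · exfalso
    have hpos : 0 < (Nat.toDigits 10 n).length := Nat.length_toDigits_pos
    rcases Nat.lt_or_ge 1 k with hk2 | hk2
    · have : n < 10 ^ (k-1) :=
        (Nat.length_toDigits_le_iff (b := 10) (n := n) (k := k-1) (by norm_num) (by omega)).1 (by omega)
      omega
    · omega
  · omega

-- char bounds helper
theorem digit_char_bounds (c : Char) (h : c.isDigit) : 48 ≤ c.toNat ∧ c.toNat ≤ 57 := by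
  simp [Char.isDigit] at h
  exact ⟨h.1, h.2⟩

theorem char_eq_zero_of_toNat (c : Char) (h : c.toNat = 48) : c = '0' := by
  have hv : c.val = ('0' : Char).val := by
    apply UInt32.toNat_inj.mp
    simpa using h
  exact Char.ext hv

-- 4. value of digit strings
def valD (cs : List Char) : Nat := cs.foldl (fun a c => 10 * a + (c.toNat - 48)) 0

theorem valD_foldl (t : List Char) : ∀ a : Nat,
    t.foldl (fun a c => 10 * a + (c.toNat - 48)) a = a * 10 ^ t.length + valD t := by
  induction t with
  | nil => intro a; simp [valD]
  | cons c rest ih =>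
    intro a
    have hv : valD (c :: rest) = (c.toNat - 48) * 10 ^ rest.length + valD rest := by
      simp only [valD, List.foldl_cons, Nat.mul_zero, Nat.zero_add]
      exact ih _
    simp only [List.foldl_cons]
    rw [ih, hv, List.length_cons]
    ring

theorem valD_append (s t : List Char) : valD (s ++ t) = valD s * 10 ^ t.length + valD t := by
  unfold valD
  rw [List.foldl_append, valD_foldl]
  rfl

theorem valD_digits (n : Nat) : valD (Nat.toDigits 10 n) = n := by
  induction n using Nat.strong_induction_on with
  | _ n ih =>
    by_cases h : n < 10
    · rw [Nat.toDigits_of_lt_base h]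
      unfold valD
      simp only [List.foldl_cons, List.foldl_nil]
      interval_cases n <;> decide
    · rw [Nat.not_lt] at h
      rw [Nat.toDigits_of_base_le (by norm_num) h, valD_append, ih (n / 10) (by omega)]
      have hd : n % 10 < 10 := Nat.mod_lt _ (by norm_num)
      have : valD [(n % 10).digitChar] = n % 10 := by
        unfold valD
        simp only [List.foldl_cons, List.foldl_nil]
        have := Nat.mod_lt n (show 0 < 10 by norm_num)
        interval_cases h : n % 10 <;> decide
      rw [this]
      simp only [List.length_singleton, pow_one]
      omega

theorem valD_lt (t : List Char) (h : ∀ c ∈ t, c.isDigit) : valD t < 10 ^ t.length := by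
  induction t with
  | nil => simp [valD]
  | cons c rest ih =>
    have : valD (c :: rest) = (c.toNat - 48) * 10 ^ rest.length + valD rest := by
      have := valD_append [c] rest
      simpa [valD] using this
    rw [this]
    have hc : c.toNat - 48 ≤ 9 := by
      have h2 := digit_char_bounds c (h c (by simp))
      omega
    have hr := ih (fun c hc => h c (by simp [hc]))
    simp only [List.length_cons, pow_succ]
    calc (c.toNat - 48) * 10 ^ rest.length + valD rest
        < (c.toNat - 48) * 10 ^ rest.length + 10 ^ rest.length := Nat.add_lt_add_left hr _
      _ = (c.toNat - 48 + 1) * 10 ^ rest.length := by ring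
      _ ≤ 10 * 10 ^ rest.length := by
          have : c.toNat - 48 + 1 ≤ 10 := by omega
          exact Nat.mul_le_mul_right _ this
      _ = 10 ^ rest.length * 10 := by ring

theorem valD_ge (c : Char) (rest : List Char) (h0 : c ≠ '0') (hd : c.isDigit) :
    10 ^ rest.length ≤ valD (c :: rest) := by
  have hv : valD (c :: rest) = (c.toNat - 48) * 10 ^ rest.length + valD rest := by
    have := valD_append [c] rest
    simpa [valD] using this
  rw [hv]
  have hc : 1 ≤ c.toNat - 48 := by
    have h2 := digit_char_bounds c hd
    have hne : c.toNat ≠ 48 := fun hx => h0 (char_eq_zero_of_toNat c hx)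
    omega
  calc 10 ^ rest.length = 1 * 10 ^ rest.length := by ring
    _ ≤ (c.toNat - 48) * 10 ^ rest.length := Nat.mul_le_mul_right _ hc
    _ ≤ _ := Nat.le_add_right _ _

-- 5. leading digit nonzero
theorem head_digits_ne_zero : ∀ n : Nat, 1 ≤ n → ∀ c, (Nat.toDigits 10 n).head? = some c → c ≠ '0' := by
  intro n
  induction n using Nat.strong_induction_on with
  | _ n ih =>
    intro hn c hc
    by_cases h : n < 10
    · rw [Nat.toDigits_of_lt_base h] at hc
      simp at hc
      subst hc
      interval_cases n <;> decide
    · rw [Nat.not_lt] at h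
      rw [Nat.toDigits_of_base_le (by norm_num) h] at hc
      have hne : Nat.toDigits 10 (n / 10) ≠ [] := by
        have := Nat.length_toDigits_pos (b := 10) (n := n / 10)
        exact List.ne_nil_of_length_pos this
      rw [List.head?_append_of_ne_nil _ hne] at hc
      exact ih (n / 10) (by omega) (by omega) c hc

-- all chars of toDigits are digits
theorem digits_all_digit {n : Nat} {c : Char} (h : c ∈ Nat.toDigits 10 n) : c.isDigit :=
  Nat.isDigit_of_mem_toDigits (by norm_num) (by norm_num) h

-- the half-split condition, on the char-list side (Bool form for filtering)
def condB (i : Int) : Bool :=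
  decide ((PySem.Int.toChars i).take ((PySem.Int.toChars i).length / 2)
    = (PySem.Int.toChars i).drop ((PySem.Int.toChars i).length / 2))

def condC (i : Int) : Prop :=
  (PySem.Int.toChars i).take ((PySem.Int.toChars i).length / 2)
    = (PySem.Int.toChars i).drop ((PySem.Int.toChars i).length / 2)

theorem condC_iff (i : Int) :
    condC i ↔ ∃ k : Nat, 1 ≤ k ∧ ∃ h : Int, 10 ^ (k-1) ≤ h ∧ h < 10 ^ k ∧ i = h * (10 ^ k + 1) := by
  constructor
  · intro hc
    unfold condC PySem.Int.toChars at hc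
    by_cases hneg : i < 0
    · exfalso
      simp only [if_pos hneg] at hc
      set D := Nat.toDigits 10 i.natAbs with hD
      have hlen : 1 ≤ D.length := Nat.length_toDigits_pos
      have hL : ('-' :: D).length = D.length + 1 := rfl
      have hhalf : 1 ≤ ('-' :: D).length / 2 := by rw [hL]; omega
      have hmem : '-' ∈ ('-' :: D).take (('-' :: D).length / 2) := by
        rcases Nat.exists_eq_add_of_le hhalf with ⟨m, hm⟩
        rw [hm]
        simp [List.take_cons]
      rw [hc] at hmem
      have hmem2 : '-' ∈ D := by
        have h2 := List.mem_of_mem_drop hmem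
        rcases Nat.exists_eq_add_of_le hhalf with ⟨m, hm⟩
        rw [hm, Nat.add_comm, List.drop_succ_cons] at hmem
        exact List.mem_of_mem_drop hmem
      have : ('-' : Char).isDigit := digits_all_digit hmem2
      simp [Char.isDigit] at this
    · -- i ≥ 0
      simp only [if_neg hneg] at hc
      set n := i.toNat with hn
      set D := Nat.toDigits 10 n with hDdef
      have hlen : 1 ≤ D.length := Nat.length_toDigits_pos
      have hkle : D.length / 2 ≤ D.length := Nat.div_le_self _ _
      have hlt : (D.take (D.length / 2)).length = D.length / 2 := by
        rw [List.length_take]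
        omega
      have hdl : (D.drop (D.length / 2)).length = D.length - D.length / 2 := List.length_drop
      have hL2 : D.length = 2 * (D.length / 2) := by
        have := congrArg List.length hc
        rw [hlt, hdl] at this
        omega
      set k := D.length / 2 with hkdef
      have hk1 : 1 ≤ k := by omega
      set t := D.take k with htdef
      have htlen : t.length = k := hlt
      have hDtt : D = t ++ t := by
        conv_lhs => rw [← List.take_append_drop k D]
        rw [← hc]
      have hvn : n = valD t * 10 ^ k + valD t := by
        conv_lhs => rw [← valD_digits n, ← hDdef, hDtt]
        rw [valD_append, htlen]
      have hn1 : 1 ≤ n := by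
        by_contra hcon
        have hn0 : n = 0 := by omega
        rw [hn0] at hDdef
        rw [Nat.toDigits_zero] at hDdef
        have : D.length = 1 := by rw [hDdef]; rfl
        omega
      have htne : t ≠ [] := by
        intro he
        rw [he] at htlen
        simp at htlen
        omega
      obtain ⟨c0, rest, hcr⟩ := List.exists_cons_of_ne_nil htne
      have hc0mem : c0 ∈ D := by rw [hDtt, hcr]; simp
      have hc0dig : c0.isDigit := digits_all_digit hc0mem
      have hc0ne : c0 ≠ '0' := by
        apply head_digits_ne_zero n hn1
        rw [← hDdef, hDtt, hcr]
        simp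
      have hrestlen : rest.length = k - 1 := by
        rw [hcr] at htlen
        simp at htlen
        omega
      have hlow : 10 ^ (k-1) ≤ valD t := by
        rw [hcr, ← hrestlen]
        exact valD_ge c0 rest hc0ne hc0dig
      have hupp : valD t < 10 ^ k := by
        rw [← htlen]
        apply valD_lt
        intro c hmem
        apply digits_all_digit (n := n)
        rw [← hDdef, hDtt]
        exact List.mem_append_left _ hmem
      refine ⟨k, hk1, (valD t : Int), ?_, ?_, ?_⟩
      · exact_mod_cast hlow
      · exact_mod_cast hupp
      · have hi : i = (n : Int) := (Int.toNat_of_nonneg (not_lt.mp hneg)).symm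
        rw [hi, hvn]
        push_cast
        ring
  · intro ⟨k, hk, h, hlo, hhi, hi⟩
    have hp1 : (1:Int) ≤ 10 ^ (k-1) := one_le_pow₀ (by norm_num)
    have hh1 : 1 ≤ h := le_trans hp1 hlo
    have hpk : (0:Int) < 10 ^ k + 1 := by positivity
    have hipos : 0 < i := by rw [hi]; positivity
    set hN := h.toNat with hNdef
    have hhN : h = (hN : Int) := (Int.toNat_of_nonneg (by omega)).symm
    have hloN : 10 ^ (k-1) ≤ hN := by
      rw [hhN] at hlo
      exact_mod_cast hlo
    have hhiN : hN < 10 ^ k := by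
      rw [hhN] at hhi
      exact_mod_cast hhi
    have hlenN : (Nat.toDigits 10 hN).length = k := len_digits_of_bounds hk hloN hhiN
    have hiN : i.toNat = hN * 10 ^ k + hN := by
      have h1 : (i.toNat : Int) = ((hN * 10 ^ k + hN : Nat) : Int) := by
        rw [Int.toNat_of_nonneg (by omega), hi, hhN]
        push_cast
        ring
      exact_mod_cast h1
    have hDD : Nat.toDigits 10 i.toNat = Nat.toDigits 10 hN ++ Nat.toDigits 10 hN := by
      rw [hiN]
      have := digits_concat hN hN (by omega)
      rw [hlenN] at this
      exact this
    unfold condC PySem.Int.toChars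
    simp only [if_neg (by omega : ¬ i < 0)]
    rw [hDD]
    have hlen2 : (Nat.toDigits 10 hN ++ Nat.toDigits 10 hN).length = 2 * k := by
      simp [hlenN]
      omega
    rw [hlen2]
    have h2k : 2 * k / 2 = k := by omega
    rw [h2k]
    rw [List.take_left' hlenN, List.drop_left' hlenN]

theorem blockmin_mono {k j : Nat} (h : k ≤ j) :
    (10:Int) ^ (k-1) * (10 ^ k + 1) ≤ 10 ^ (j-1) * (10 ^ j + 1) := by
  have h1 : (10:Int) ^ (k-1) ≤ 10 ^ (j-1) := pow_le_pow_right₀ (by norm_num) (by omega)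
  have h2 : (10:Int) ^ k ≤ 10 ^ j := pow_le_pow_right₀ (by norm_num) h
  have h3 : (0:Int) < 10 ^ (k-1) := by positivity
  exact mul_le_mul h1 (by linarith) (by positivity) (by positivity)

theorem ceil_le_iff {a b q : Int} (hb : 0 < b) :
    -(PySem.Int.floordiv (-a) b) ≤ q ↔ a ≤ q * b := by
  rw [neg_le, PySem.Int.le_floordiv_iff_mul_le hb]
  constructor <;> intro h <;> nlinarith

theorem go_mem (start end_ : Int) (k : Nat) (hk : 1 ≤ k) (i : Int) :
    i ∈ altGo start end_ k ↔
      ∃ j : Nat, k ≤ j ∧ ∃ h : Int, 10 ^ (j-1) ≤ h ∧ h < 10 ^ j ∧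
        start ≤ i ∧ i ≤ end_ ∧ i = h * (10 ^ j + 1) := by
  induction k using altGo.induct (start := start) (end_ := end_) with
  | case1 k hstop =>
    rw [altGo, if_pos hstop]
    simp only [List.not_mem_nil, false_iff]
    rintro ⟨j, hkj, h, hlo, hhi, hsi, hie, hieq⟩
    have hmono := blockmin_mono hkj
    have hp : (0:Int) < 10 ^ j + 1 := by positivity
    have : 10 ^ (j-1) * (10 ^ j + 1) ≤ i := by
      rw [hieq]
      exact mul_le_mul_of_nonneg_right hlo (by positivity)
    omega
  | case2 k hcont ih =>
    rw [altGo, if_neg hcont]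
    simp only [List.mem_append, List.mem_map, PySem.List.mem_pyRange_one]
    have hp : (0:Int) < 10 ^ k + 1 := by positivity
    constructor
    · rintro (⟨h, ⟨⟨hlo, hhi⟩, hieq⟩⟩ | htail)
      · rw [max_le_iff] at hlo
        have hhi' : h ≤ min (10 ^ k - 1) (PySem.Int.floordiv end_ (10 ^ k + 1)) := by omega
        rw [le_min_iff] at hhi'
        refine ⟨k, le_refl _, h, hlo.1, by omega, ?_, ?_, hieq.symm⟩
        · rw [← hieq]
          exact (ceil_le_iff hp).mp hlo.2
        · rw [← hieq]
          exact (PySem.Int.le_floordiv_iff_mul_le hp).mp hhi'.2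
      · obtain ⟨j, hkj, rest⟩ := (ih (by omega)).mp htail
        exact ⟨j, by omega, rest⟩
    · rintro ⟨j, hkj, h, hlo, hhi, hsi, hie, hieq⟩
      rcases Nat.eq_or_lt_of_le hkj with hjk | hjk
      · subst hjk
        left
        refine ⟨h, ⟨⟨max_le_iff.mpr ⟨hlo, (ceil_le_iff hp).mpr (by rw [← hieq]; exact hsi)⟩, ?_⟩, hieq.symm⟩⟩
        have hm : h ≤ min (10 ^ k - 1) (PySem.Int.floordiv end_ (10 ^ k + 1)) :=
          le_min_iff.mpr ⟨by omega, (PySem.Int.le_floordiv_iff_mul_le hp).mpr (by rw [← hieq]; exact hie)⟩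
        omega
      · right
        exact (ih (by omega)).mpr ⟨j, by omega, h, hlo, hhi, hsi, hie, hieq⟩

theorem go_pairwise (start end_ : Int) (k : Nat) :
    (altGo start end_ k).Pairwise (· < ·) := by
  induction k using altGo.induct (start := start) (end_ := end_) with
  | case1 k hstop => rw [altGo, if_pos hstop]; exact List.Pairwise.nil
  | case2 k hcont ih =>
    rw [altGo, if_neg hcont]
    have hp : (0:Int) < 10 ^ k + 1 := by positivity
    apply List.pairwise_append.mpr
    refine ⟨?_, ih, ?_⟩
    · apply List.Pairwise.map
      · intro a b hab
        exact mul_lt_mul_of_pos_right hab hp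
      · exact PySem.List.pairwise_lt_pyRange_one _ _
    · intro x hx y hy
      simp only [List.mem_map, PySem.List.mem_pyRange_one] at hx
      obtain ⟨h, ⟨⟨hlo, hhi⟩, hxe⟩⟩ := hx
      have hxb : x ≤ (10 ^ k - 1) * (10 ^ k + 1) := by
        rw [← hxe]
        apply mul_le_mul_of_nonneg_right _ (by positivity)
        omega
      obtain ⟨j, hkj, h', hlo', hhi', _, _, hye⟩ := (go_mem start end_ (k+1) (by omega) y).mp hy
      have hyb : 10 ^ (j-1) * (10 ^ j + 1) ≤ y := by
        rw [hye]
        exact mul_le_mul_of_nonneg_right hlo' (by positivity)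
      have hmono : (10:Int) ^ k * (10 ^ (k+1) + 1) ≤ 10 ^ (j-1) * (10 ^ j + 1) :=
        blockmin_mono (k := k+1) (j := j) hkj
      have hkk : (10:Int) ^ (k+1) = 10 * 10 ^ k := by ring
      nlinarith [pow_pos (show (0:Int) < 10 by norm_num) k]

-- A's Bool test equals the decidable condC
theorem str_beq_eq (a b : String) : (a == b) = decide (a.toList = b.toList) := by
  by_cases h : a = b <;> simp [h, String.toList_inj]

theorem condB_iff (i : Int) : condB i = true ↔ condC i := by
  unfold condB condC
  exact decide_eq_true_iff

theorem condA_eq (i : Int) :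
    (PySem.Str.slice (PySem.Int.toStr i) (some 0)
        (some (PySem.Int.floordiv (PySem.Str.len (PySem.Int.toStr i)) 2))
      == PySem.Str.slice (PySem.Int.toStr i)
        (some (PySem.Int.floordiv (PySem.Str.len (PySem.Int.toStr i)) 2)) none)
    = condB i := by
  rw [PySem.Str.len_eq, str_beq_eq]
  have hfd : PySem.Int.floordiv ((PySem.Int.toStr i).toList.length : Int) 2
      = (((PySem.Int.toStr i).toList.length / 2 : Nat) : Int) := by
    exact_mod_cast PySem.Int.floordiv_natCast (PySem.Int.toStr i).toList.length 2
  rw [hfd]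
  simp only [PySem.Str.slice, PySem.Chars.slice, PySem.List.slice_zero_start, PySem.List.slice_to_natCast,
    PySem.List.slice_from_natCast, PySem.Int.toList_toStr, String.toList_ofList, condB]

-- A is the filter of the range by condC
theorem A_eq_filter (start end_ : Int) :
    find_invalid_id start end_
      = (PySem.List.pyRange start (end_ + 1) 1).filter (fun i => condB i) := by
  have h1 : find_invalid_id start end_
      = (PySem.List.pyRange start (end_ + 1) 1).foldl
          (fun acc i => if (fun i => PySem.Str.slice (PySem.Int.toStr i) (some 0)
              (some (PySem.Int.floordiv (PySem.Str.len (PySem.Int.toStr i)) 2))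
            == PySem.Str.slice (PySem.Int.toStr i)
              (some (PySem.Int.floordiv (PySem.Str.len (PySem.Int.toStr i)) 2)) none) i
            then acc ++ [i] else acc) [] := rfl
  rw [h1, PySem.List.foldl_append_if_eq_filter]
  rw [List.nil_append]
  apply List.filter_congr
  intro i _
  exact condA_eq i

-- final equality
theorem main_eq (start end_ : Int) : find_invalid_id start end_ = altGo start end_ 1 := by
  rw [A_eq_filter]
  have hpA : ((PySem.List.pyRange start (end_ + 1) 1).filter (fun i => condB i)).Pairwise (· < ·) :=
    List.Pairwise.filter _ (PySem.List.pairwise_lt_pyRange_one _ _)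
  have hpB : (altGo start end_ 1).Pairwise (· < ·) := go_pairwise start end_ 1
  have hmem : ∀ i : Int,
      i ∈ (PySem.List.pyRange start (end_ + 1) 1).filter (fun i => condB i)
        ↔ i ∈ altGo start end_ 1 := by
    intro i
    rw [List.mem_filter, PySem.List.mem_pyRange_one, go_mem start end_ 1 (le_refl 1) i,
      condB_iff, condC_iff]
    constructor
    · rintro ⟨⟨hsi, hie⟩, k, hk, h, hlo, hhi, hieq⟩
      exact ⟨k, hk, h, hlo, hhi, hsi, by omega, hieq⟩
    · rintro ⟨k, hk, h, hlo, hhi, hsi, hie, hieq⟩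
      exact ⟨⟨hsi, by omega⟩, k, hk, h, hlo, hhi, hieq⟩
  have hperm := (List.perm_ext_iff_of_nodup
    (hpA.imp (fun h => ne_of_lt h)) (hpB.imp (fun h => ne_of_lt h))).mpr hmem
  exact List.Perm.eq_of_pairwise (fun a b _ _ hab hba => by omega) hpA hpB hperm


-- ===== VERDICT (by name: the statement is the Claim_ definition above) =====
theorem find_invalid_id_spec : Claim_equal_find_invalid_id := by
  intro start end_ _hd
  unfold Spec_find_invalid_id find_invalid_id_alt
  exact main_eq start end_
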